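-- pv_equiv track=rewrite | github.com/cedric-chaillou/advent_of_code | 2024/22/Puzzle 2/solve.py | prices_sequences
-- ===== SOURCE A (Python) =====
-- def mix( a, b ) :
--     return a ^ b
--
-- def prune( a ) :
--     # 16777216 = 0x1000000 = 0xffffff + 1
--     # donc a % 16777216 == a & 0xffffff
--     return a & 0xffffff
--
-- def mul_bin( a, b ) :
--     # a * 2^b
--     return a << b
--
-- def mul_2048( a ) :
--     return mul_bin( a, 11 )
--
-- def mul_64( a ) :
--     return mul_bin( a, 6 )
--
-- def div_int_bin( a, b ) :
--     # a / 2^b, rounded down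
--     return a >> b
--
-- def div_32( a ) :
--     return div_int_bin( a, 5 )
--
-- def next_secret_number( secret_number ) :
--     secret_number = prune( mix( mul_64( secret_number ), secret_number ) )
--     secret_number = prune( mix( div_32( secret_number ), secret_number ) )
--     secret_number = prune( mix( mul_2048( secret_number ), secret_number ) )
--     return secret_number
--
-- def prices_sequences( secret_number, nb_iter = 2000 ) :
--     price = secret_number % 10
--     diff = None
--     seq = []
--     all_seq = {}
--     for i in range( nb_iter ) :
--         secret_number = next_secret_number( secret_number )
--         prev = price
--         price = secret_number % 10
--         diff = price - prev
--         seq.append( diff )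
--         if len( seq ) > 4 :
--             seq.pop( 0 )
--         if len( seq ) == 4 :
--             key = ",".join( [ str(n) for n in seq ] )
--             if ( key not in all_seq ) :
--                 all_seq[ key ] = price
--     return all_seq
-- ===== SOURCE B (Python) =====
-- def mix(a, b):
--     return a ^ b
--
-- def prune(a):
--     return a & 0xffffff
--
-- def next_secret_number(secret_number):
--     secret_number = prune(mix(secret_number << 6, secret_number))
--     secret_number = prune(mix(secret_number >> 5, secret_number))
--     secret_number = prune(mix(secret_number << 11, secret_number))
--     return secret_number
--
-- def prices_sequences(secret_number, nb_iter=2000):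
--     # phase 1: the full list of prices
--     prices = [secret_number % 10]
--     s = secret_number
--     for _ in range(nb_iter):
--         s = next_secret_number(s)
--         prices.append(s % 10)
--     # phase 2: the consecutive differences
--     diffs = [b - a for a, b in zip(prices, prices[1:])]
--     # phase 3: slide a 4-window; first occurrence of each key wins
--     result = {}
--     for i in range(len(diffs) - 3):
--         key = ",".join(str(d) for d in diffs[i:i+4])
--         if key not in result:
--             result[key] = prices[i + 4]
--     return result
-- ===== Notes on version B (the rewrite author's own statement) =====
-- stated objective: simpler
-- what changed: Replaces A's single streaming loop that maintains a running 4-element deque, previous price and dict all at once with three plain phases: build the full prices list, derive the diffs list with zip, then slide a 4-window over it by index with first-occurrence-wins.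
import Mathlib
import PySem

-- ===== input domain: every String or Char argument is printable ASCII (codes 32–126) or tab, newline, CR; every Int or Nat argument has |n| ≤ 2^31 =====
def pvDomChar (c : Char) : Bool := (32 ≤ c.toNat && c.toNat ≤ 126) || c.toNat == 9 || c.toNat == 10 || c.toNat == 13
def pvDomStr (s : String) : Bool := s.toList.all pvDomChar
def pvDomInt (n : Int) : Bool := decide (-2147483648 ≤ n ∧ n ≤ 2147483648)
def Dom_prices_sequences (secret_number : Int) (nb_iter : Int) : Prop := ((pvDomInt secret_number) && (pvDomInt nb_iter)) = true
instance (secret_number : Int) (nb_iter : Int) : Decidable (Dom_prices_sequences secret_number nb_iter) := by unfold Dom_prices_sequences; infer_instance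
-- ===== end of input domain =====

-- B restates A's streaming loop (running 4-deque + dict) as three phases: build the full
-- prices list, derive the diffs list, then slide a 4-window by index (objective: simpler).

-- ===== PORT A =====
def pvA_mix (a b : Int) : Int := PySem.Int.bxor a b

def pvA_prune (a : Int) : Int := PySem.Int.band a 0xffffff

def pvA_mul_bin (a : Int) (b : Nat) : Int := a <<< b

def pvA_mul_2048 (a : Int) : Int := pvA_mul_bin a 11

def pvA_mul_64 (a : Int) : Int := pvA_mul_bin a 6

def pvA_div_int_bin (a : Int) (b : Nat) : Int := a >>> b

def pvA_div_32 (a : Int) : Int := pvA_div_int_bin a 5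

def pvA_next_secret_number (secret_number : Int) : Int :=
  let s1 := pvA_prune (pvA_mix (pvA_mul_64 secret_number) secret_number)
  let s2 := pvA_prune (pvA_mix (pvA_div_32 s1) s1)
  pvA_prune (pvA_mix (pvA_mul_2048 s2) s2)

def prices_sequences (secret_number : Int) (nb_iter : Int) : List (String × Int) :=
  let price := PySem.Int.mod secret_number 10
  let st := (PySem.List.pyRange 0 nb_iter 1).foldl
    (fun (st : Int × Int × List Int × PySem.Dict String Int) _i =>
      let (sec, price, seq, all_seq) := st
      let sec := pvA_next_secret_number sec
      let prev := price
      let price := PySem.Int.mod sec 10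
      let diff := price - prev
      let seq := seq ++ [diff]
      -- seq.pop(0): guard makes seq nonempty, so pop? 0 is some
      let seq := if 4 < seq.length then
          (match PySem.List.pop? seq 0 with
           | some r => r.2
           | none => seq)
        else seq
      let all_seq := if seq.length == 4 then
          let key := PySem.Str.join "," (seq.map PySem.Int.toStr)
          if all_seq.contains key then all_seq else all_seq.insert key price
        else all_seq
      (sec, price, seq, all_seq))
    (secret_number, price, ([] : List Int), PySem.Dict.empty)
  st.2.2.2.items

-- ===== PORT B =====
def pvB_next_secret_number (secret_number : Int) : Int :=
  let s1 := PySem.Int.band (PySem.Int.bxor (secret_number <<< (6:Nat)) secret_number) 0xffffff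
  let s2 := PySem.Int.band (PySem.Int.bxor (s1 >>> (5:Nat)) s1) 0xffffff
  PySem.Int.band (PySem.Int.bxor (s2 <<< (11:Nat)) s2) 0xffffff

def prices_sequences_alt (secret_number : Int) (nb_iter : Int) : List (String × Int) :=
  -- phase 1: full prices list
  let st := (PySem.List.pyRange 0 nb_iter 1).foldl
    (fun (st : Int × List Int) _i =>
      let s := pvB_next_secret_number st.1
      (s, st.2 ++ [PySem.Int.mod s 10]))
    (secret_number, [PySem.Int.mod secret_number 10])
  let prices := st.2
  -- phase 2: consecutive differences (zip(prices, prices[1:]))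
  let diffs := (prices.zip (PySem.List.slice prices (some 1) none)).map (fun ab => ab.2 - ab.1)
  -- phase 3: 4-window slide, first occurrence wins
  let result := (PySem.List.pyRange 0 (PySem.List.len diffs - 3) 1).foldl
    (fun (result : PySem.Dict String Int) i =>
      let key := PySem.Str.join "," ((PySem.List.slice diffs (some i) (some (i + 4))).map PySem.Int.toStr)
      if result.contains key then result
      else result.insert key (PySem.List.pyGetD prices (i + 4) 0))
    PySem.Dict.empty
  result.items

-- ===== PRECONDITION & SPEC =====
def Spec_prices_sequences (secret_number : Int) (nb_iter : Int) (out : List (String × Int)) : Prop := out = prices_sequences_alt secret_number nb_iter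
instance (secret_number : Int) (nb_iter : Int) (out : List (String × Int)) : Decidable (Spec_prices_sequences secret_number nb_iter out) := by unfold Spec_prices_sequences; infer_instance

-- ===== CLAIM (what is proved, stated in full; the proofs are below) =====
def Claim_equal_prices_sequences : Prop := ∀ (secret_number : Int) (nb_iter : Int), Dom_prices_sequences secret_number nb_iter → Spec_prices_sequences secret_number nb_iter (prices_sequences secret_number nb_iter)

-- ===== LEMMAS AND PROOFS =====

-- the secret after k steps, the price at step k, the diff between steps k and k+1
def pvSec (s0 : Int) : Nat → Int
  | 0 => s0
  | k + 1 => pvA_next_secret_number (pvSec s0 k)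

def pvPr (s0 : Int) (k : Nat) : Int := PySem.Int.mod (pvSec s0 k) 10

def pvDf (s0 : Int) (k : Nat) : Int := pvPr s0 (k + 1) - pvPr s0 k

def pvPair (s0 : Int) (j : Nat) : String × Int :=
  (PySem.Str.join "," ([pvDf s0 j, pvDf s0 (j+1), pvDf s0 (j+2), pvDf s0 (j+3)].map PySem.Int.toStr),
   pvPr s0 (j + 4))

def pvIns (d : PySem.Dict String Int) (p : String × Int) : PySem.Dict String Int :=
  if d.contains p.1 then d else d.insert p.1 p.2

def pvPairs (s0 : Int) (n : Nat) : List (String × Int) :=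
  (List.range (n - 3)).map (pvPair s0)

lemma pv_next_eq : pvB_next_secret_number = pvA_next_secret_number := by
  funext s
  simp only [pvA_next_secret_number, pvB_next_secret_number, pvA_prune, pvA_mix, pvA_mul_64,
    pvA_mul_2048, pvA_div_32, pvA_mul_bin, pvA_div_int_bin]

-- the last-4 window of a map over a range, explicitly
lemma pv_drop4 (f : Nat → Int) (n : Nat) (h : 4 <= n) :
    (((List.range n).map f).drop (n - 4)) = [f (n-4), f (n-3), f (n-2), f (n-1)] := by
  apply List.ext_getElem
  · simp only [List.length_drop, List.length_map, List.length_range, List.length_cons,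
      List.length_nil]
    omega
  · intro i h1 h2
    have hi : i < 4 := by simpa using h2
    simp only [List.getElem_drop, List.getElem_map, List.getElem_range]
    interval_cases i <;> (congr 1 <;> omega)

-- a 4-window at position k of a map over a range, explicitly
lemma pv_window4 (f : Nat → Int) (n k : Nat) (h : k + 4 <= n) :
    ((((List.range n).map f).drop k).take 4) = [f k, f (k+1), f (k+2), f (k+3)] := by
  apply List.ext_getElem
  · simp only [List.length_take, List.length_drop, List.length_map, List.length_range,
      List.length_cons, List.length_nil]
    omega
  · intro i h1 h2
    have hi : i < 4 := by simpa using h2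
    simp only [List.getElem_take, List.getElem_drop, List.getElem_map, List.getElem_range]
    interval_cases i <;> congr 1

-- A's loop state after the whole range
lemma pv_A_loop (s0 b : Int) :
    List.foldl
      (fun (st : Int × Int × List Int × PySem.Dict String Int) _i =>
        let (sec, price, seq, all_seq) := st
        let sec := pvA_next_secret_number sec
        let prev := price
        let price := PySem.Int.mod sec 10
        let diff := price - prev
        let seq := seq ++ [diff]
        let seq := if 4 < seq.length then
            (match PySem.List.pop? seq 0 with
             | some r => r.2
             | none => seq)
          else seq
        let all_seq := if seq.length == 4 then
            let key := PySem.Str.join "," (seq.map PySem.Int.toStr)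
            if all_seq.contains key then all_seq else all_seq.insert key price
          else all_seq
        (sec, price, seq, all_seq))
      (s0, PySem.Int.mod s0 10, ([] : List Int), PySem.Dict.empty)
      (PySem.List.pyRange 0 b 1)
    = (pvSec s0 b.toNat, pvPr s0 b.toNat,
       ((List.range b.toNat).map (pvDf s0)).drop (b.toNat - 4),
       (pvPairs s0 b.toNat).foldl pvIns PySem.Dict.empty) := by
  by_cases hb : (0:Int) ≤ b
  · obtain ⟨n, rfl⟩ : ∃ n : Nat, b = (n : Int) := ⟨b.toNat, (Int.toNat_of_nonneg hb).symm⟩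
    rw [Int.toNat_natCast]
    clear hb
    induction n with
    | zero =>
      rw [PySem.List.pyRange_one_eq_nil (by norm_num)]
      simp [pvSec, pvPr, pvPairs]
    | succ n ih =>
      rw [show ((n + 1 : Nat) : Int) = (n : Int) + 1 by push_cast; ring,
        PySem.List.pyRange_one_succ_right (by positivity), List.foldl_append, ih]
      clear ih
      simp only [List.foldl_cons, List.foldl_nil]
      have hdf : PySem.Int.mod (pvA_next_secret_number (pvSec s0 n)) 10 - pvPr s0 n
          = pvDf s0 n := rfl
      have hpr : PySem.Int.mod (pvA_next_secret_number (pvSec s0 n)) 10 = pvPr s0 (n+1) := rfl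
      have hsec : pvA_next_secret_number (pvSec s0 n) = pvSec s0 (n+1) := rfl
      rw [hdf, hpr, hsec]
      by_cases h4 : 4 ≤ n
      · rw [pv_drop4 _ _ h4, pv_drop4 _ _ (show 4 ≤ n + 1 by omega)]
        simp only [List.length_append, List.length_cons, List.length_nil]
        norm_num
        refine ⟨⟨by congr 1, by congr 1, by congr 1⟩, ?_⟩
        have hp : pvPairs s0 (n + 1) = pvPairs s0 n ++ [pvPair s0 (n - 3)] := by
          unfold pvPairs
          rw [show n + 1 - 3 = (n - 3) + 1 by omega, List.range_succ, List.map_append,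
            List.map_singleton]
        rw [hp, List.foldl_append, List.foldl_cons, List.foldl_nil]
        unfold pvIns pvPair
        simp only [show n - 3 + 1 = n - 2 from by omega, show n - 3 + 2 = n - 1 from by omega,
          show n - 3 + 3 = n from by omega, show n - 3 + 4 = n + 1 from by omega,
          List.map_cons, List.map_nil]
      · interval_cases n <;>
          simp [pvPairs, pvPair, pvIns, pvDf, List.range_succ, pvSec, pvPr]
  · rw [PySem.List.pyRange_one_eq_nil (by omega)]
    rw [show b.toNat = 0 by omega]
    simp [pvSec, pvPr, pvPairs]

-- B's prices-building loop state after the whole range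
lemma pv_B_prices (s0 b : Int) :
    List.foldl
      (fun (st : Int × List Int) _i =>
        let s := pvB_next_secret_number st.1
        (s, st.2 ++ [PySem.Int.mod s 10]))
      (s0, [PySem.Int.mod s0 10])
      (PySem.List.pyRange 0 b 1)
    = (pvSec s0 b.toNat, (List.range (b.toNat + 1)).map (pvPr s0)) := by
  by_cases hb : (0:Int) ≤ b
  · obtain ⟨n, rfl⟩ : ∃ n : Nat, b = (n : Int) := ⟨b.toNat, (Int.toNat_of_nonneg hb).symm⟩
    rw [Int.toNat_natCast]
    clear hb
    induction n with
    | zero =>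
      rw [PySem.List.pyRange_one_eq_nil (by norm_num)]
      simp [pvSec, pvPr]
    | succ n ih =>
      rw [show ((n + 1 : Nat) : Int) = (n : Int) + 1 by push_cast; ring,
        PySem.List.pyRange_one_succ_right (by positivity), List.foldl_append, ih]
      simp [pv_next_eq, pvSec, pvPr, List.range_succ]
  · rw [PySem.List.pyRange_one_eq_nil (by omega)]
    rw [show b.toNat = 0 by omega]
    simp [pvSec, pvPr]

-- the diffs list computed from the prices list
lemma pv_B_diffs (s0 : Int) (n : Nat) :
    ((((List.range (n + 1)).map (pvPr s0)).zip
        (PySem.List.slice ((List.range (n + 1)).map (pvPr s0)) (some 1) none)).map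
      (fun ab => ab.2 - ab.1)) = (List.range n).map (pvDf s0) := by
  rw [PySem.List.slice_from_one]
  apply List.ext_getElem
  · simp
  · intro i h1 h2
    simp only [List.getElem_map, List.getElem_zip, List.getElem_tail, List.getElem_range]
    rfl

-- B's window loop is the fold of pvIns over pvPairs
lemma pv_B_windows (s0 : Int) (n : Nat) :
    List.foldl
      (fun (result : PySem.Dict String Int) i =>
        let key := PySem.Str.join ","
          ((PySem.List.slice ((List.range n).map (pvDf s0)) (some i) (some (i + 4))).map PySem.Int.toStr)
        if result.contains key then result
        else result.insert key (PySem.List.pyGetD ((List.range (n + 1)).map (pvPr s0)) (i + 4) 0))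
      PySem.Dict.empty
      (PySem.List.pyRange 0 (PySem.List.len ((List.range n).map (pvDf s0)) - 3) 1)
    = (pvPairs s0 n).foldl pvIns PySem.Dict.empty := by
  simp only [PySem.List.len_eq, List.length_map, List.length_range]
  rw [PySem.List.pyRange_one, List.foldl_map]
  unfold pvPairs
  rw [List.foldl_map]
  rw [show ((n : Int) - 3 - 0).toNat = n - 3 by omega]
  apply PySem.List.foldl_congr_mem'
  intro k hk acc
  have hklt : k < n - 3 := List.mem_range.mp hk
  have hs : PySem.List.slice ((List.range n).map (pvDf s0)) (some ((0:Int) + k))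
      (some ((0:Int) + k + 4)) = [pvDf s0 k, pvDf s0 (k+1), pvDf s0 (k+2), pvDf s0 (k+3)] := by
    rw [show ((0:Int) + k) = ((k : Nat) : Int) by ring]
    rw [show ((k : Nat) : Int) + 4 = ((k + 4 : Nat) : Int) by push_cast; ring]
    rw [PySem.List.slice_natCast, show k + 4 - k = 4 by omega]
    exact pv_window4 _ _ _ (by omega)
  have hg : PySem.List.pyGetD ((List.range (n+1)).map (pvPr s0)) ((0:Int) + k + 4) 0
      = pvPr s0 (k+4) := by
    rw [show ((0:Int) + k + 4) = ((k + 4 : Nat) : Int) by push_cast; ring,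
      PySem.List.pyGetD_natCast]
    rw [List.getD_eq_getElem?_getD]
    simp [show k + 4 < n + 1 by omega]
  simp only [hs, hg]
  rfl

-- ===== VERDICT (by name: the statement is the Claim_ definition above) =====
theorem prices_sequences_spec : Claim_equal_prices_sequences := by
  intro s0 nb _hdom
  unfold Spec_prices_sequences
  dsimp only [prices_sequences, prices_sequences_alt]
  rw [pv_A_loop, pv_B_prices]
  simp only [pv_B_diffs]
  rw [pv_B_windows]
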